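-- pv_equiv track=rewrite | github.com/aceiii/advent-of-code-2024 | python/day09.py | parse_disk
-- ===== SOURCE A (Python) =====
-- def parse_disk(line):
--     idx = 0
--     blocks = []
--     while idx < len(line):
--         file = int(line[idx:idx+1], 10)
--         free = int(line[idx+1:idx+2] or '0', 10)
--         blocks.append((file, free))
--         idx += 2
--     return blocks
-- ===== SOURCE B (Python) =====
-- def parse_disk(line):
--     if len(line) % 2:
--         line = line + '0'
--     files = line[0::2]
--     frees = line[1::2]
--     return [(int(f), int(g)) for f, g in zip(files, frees)]
-- ===== Notes on version B (the rewrite author's own statement) =====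
-- stated objective: idiomatic
-- what changed: Replaces the manual index-stepping while-loop with slicing plus a zero-digit pad: the two strided subsequences line[0::2] and line[1::2] are zipped into pairs, so no explicit index bookkeeping or per-step slicing remains.
import Mathlib
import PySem

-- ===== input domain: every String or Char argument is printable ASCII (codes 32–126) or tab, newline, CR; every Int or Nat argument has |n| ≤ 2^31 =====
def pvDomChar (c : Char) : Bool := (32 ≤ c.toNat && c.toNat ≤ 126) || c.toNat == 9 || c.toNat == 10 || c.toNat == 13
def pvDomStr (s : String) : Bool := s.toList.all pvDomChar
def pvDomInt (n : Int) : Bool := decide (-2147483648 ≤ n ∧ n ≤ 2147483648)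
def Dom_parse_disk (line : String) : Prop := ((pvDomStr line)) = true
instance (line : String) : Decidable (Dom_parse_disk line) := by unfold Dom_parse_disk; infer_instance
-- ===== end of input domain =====

-- B replaces A's index-stepping while-loop by a zero-digit pad plus the two strided slices
-- line[0::2] / line[1::2] zipped into pairs (idiomatic decomposition, same O(n) cost).

-- ===== PORT A =====
-- while idx < len(line): file = int(line[idx:idx+1], 10); free = int(line[idx+1:idx+2] or '0', 10); append; idx += 2
def parse_disk_go (cs : List Char) (idx : Nat) : List (Int × Int) :=
  if h : idx < cs.length then
    let file := (PySem.Int.ofCharsBase? (PySem.List.slice cs (some (idx : Int)) (some ((idx : Int) + 1))) 10).getD 0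
    let freeS := PySem.List.slice cs (some ((idx : Int) + 1)) (some ((idx : Int) + 2))
    let free := (PySem.Int.ofCharsBase? (if freeS = [] then ['0'] else freeS) 10).getD 0
    (file, free) :: parse_disk_go cs (idx + 2)
  else []
termination_by cs.length - idx
decreasing_by omega

def parse_disk (line : String) : List (Int × Int) := parse_disk_go line.toList 0

-- ===== PORT B =====
-- pad with a zero digit if odd length, slice files = line[0::2], frees = line[1::2], zip and int() each char
def parse_disk_alt (line : String) : List (Int × Int) :=
  let cs := if line.toList.length % 2 = 1 then line.toList ++ ['0'] else line.toList
  let files := (PySem.Chars.slice? cs (some 0) none 2).getD []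
  let frees := (PySem.Chars.slice? cs (some 1) none 2).getD []
  (List.zip files frees).map (fun p => ((PySem.Int.ofChars? [p.1]).getD 0, (PySem.Int.ofChars? [p.2]).getD 0))

-- ===== PRECONDITION & SPEC =====
-- Pre_ excludes exactly the inputs where Python A raises ValueError: int(c, 10) on a non-digit character.
def Pre_parse_disk (line : String) : Prop := line.toList.all Char.isDigit = true
instance (line : String) : Decidable (Pre_parse_disk line) := by unfold Pre_parse_disk; infer_instance
def pvWitness_parse_disk : String := "12345"

def Spec_parse_disk (line : String) (out : List (Int × Int)) : Prop := out = parse_disk_alt line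
instance (line : String) (out : List (Int × Int)) : Decidable (Spec_parse_disk line out) := by unfold Spec_parse_disk; infer_instance

-- ===== CLAIM (what is proved, stated in full; the proofs are below) =====
def Claim_equal_parse_disk : Prop := ∀ (line : String), Dom_parse_disk line → Pre_parse_disk line → Spec_parse_disk line (parse_disk line)

-- ===== LEMMAS AND PROOFS =====

-- int(c, 10) = int(c) = value of a digit character
theorem pv_digit_eq (c : Char) (h : c.isDigit = true) :
    PySem.Int.ofCharsBase? [c] 10 = PySem.Int.ofChars? [c] := by
  have h1 : 48 ≤ c.toNat ∧ c.toNat ≤ 57 := by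
    simp [Char.isDigit] at h; exact ⟨h.1, h.2⟩
  obtain ⟨h48, h57⟩ := h1
  rw [← Char.ofNat_toNat c]
  set n := c.toNat with hn
  clear_value n
  interval_cases n <;> decide

def pvValA (c : Char) : Int := (PySem.Int.ofCharsBase? [c] 10).getD 0
def pvValB (c : Char) : Int := (PySem.Int.ofChars? [c]).getD 0

mutual
def pvEvens : List Char → List Char
  | [] => []
  | a :: r => a :: pvOdds r
def pvOdds : List Char → List Char
  | [] => []
  | _ :: r => pvEvens r
end

-- the consecutive (even,odd) pairs, dropping an unpaired last element
def pvPairsC : List Char → List (Char × Char)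
  | [] => []
  | [_] => []
  | a :: b :: r => (a, b) :: pvPairsC r

-- A's result as a two-at-a-time recursion
def pvPairsA : List Char → List (Int × Int)
  | [] => []
  | [a] => [(pvValA a, pvValA '0')]
  | a :: b :: r => (pvValA a, pvValA b) :: pvPairsA r

def pvPad (cs : List Char) : List Char := if cs.length % 2 = 1 then cs ++ ['0'] else cs

theorem pv_fm_strided (xs : List Char) :
    (List.filterMap (fun k => xs[2*k]?) (List.range ((xs.length+1)/2)) = pvEvens xs) ∧
    (List.filterMap (fun k => xs[2*k+1]?) (List.range (xs.length/2)) = pvOdds xs) := by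
  induction xs with
  | nil => constructor <;> simp [pvEvens, pvOdds]
  | cons a r ih =>
    constructor
    · have hc : ((a::r).length + 1)/2 = r.length/2 + 1 := by
        simp only [List.length_cons]; omega
      rw [hc, List.range_succ_eq_map, List.filterMap_cons, List.filterMap_map]
      simp only [Function.comp]
      have h2 : (fun k => (a::r)[2*Nat.succ k]?) = (fun k => r[2*k+1]?) := by
        funext k
        have h3 : 2 * Nat.succ k = (2*k+1)+1 := by omega
        rw [h3, List.getElem?_cons_succ]
      rw [h2, ih.2]
      simp [pvEvens]
    · have hc : (a::r).length/2 = (r.length+1)/2 := by simp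
      rw [hc]
      have h2 : (fun k => (a::r)[2*k+1]?) = (fun k => r[2*k]?) := by
        funext k; rw [List.getElem?_cons_succ]
      rw [h2, ih.1]
      simp [pvOdds]

theorem pv_slice_zero_two (xs : List Char) :
    PySem.List.slice? xs (some 0) none 2 = some (pvEvens xs) := by
  rw [← (pv_fm_strided xs).1]
  simp only [PySem.List.slice?, PySem.List.sliceIndices]
  norm_num
  have hc : (if 0 < xs.length then (((xs.length:Int) + 2 - 1) / 2).toNat else 0) = (xs.length + 1) / 2 := by
    split <;> omega
  rw [hc]
  congr 1

theorem pv_slice_one_two (xs : List Char) :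
    PySem.List.slice? xs (some 1) none 2 = some (pvOdds xs) := by
  rw [← (pv_fm_strided xs).2]
  simp only [PySem.List.slice?, PySem.List.sliceIndices]
  norm_num
  rcases Nat.eq_zero_or_pos xs.length with h|h
  · simp [h]
  · have hmin : min (1:Int) (xs.length:Int) = 1 := by omega
    rw [hmin]
    have hc : (if 1 < xs.length then (((xs.length:Int) - 1 + 2 - 1)/2).toNat else 0) = xs.length/2 := by
      split <;> omega
    rw [hc]
    have hfun : (fun x : Nat => xs[((1:Int) + 2 * (x:Int)).toNat]?) = fun k => xs[2*k+1]? := by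
      funext k; congr 1; omega
    rw [hfun]

theorem pv_zip_evens_odds (cs : List Char) :
    List.zip (pvEvens cs) (pvOdds cs) = pvPairsC cs := by
  match cs with
  | [] => rfl
  | [a] => rfl
  | a :: b :: r =>
    show List.zip (a :: pvEvens r) (b :: pvOdds r) = (a, b) :: pvPairsC r
    rw [List.zip_cons_cons, pv_zip_evens_odds r]

theorem pv_mem_pairsC (cs : List Char) (p : Char × Char) (hp : p ∈ pvPairsC cs) :
    p.1 ∈ cs ∧ p.2 ∈ cs := by
  match cs with
  | [] => simp [pvPairsC] at hp
  | [a] => simp [pvPairsC] at hp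
  | a :: b :: r =>
    simp only [pvPairsC, List.mem_cons] at hp
    rcases hp with h | h
    · subst h; constructor <;> simp
    · have := pv_mem_pairsC r p h
      constructor <;> simp [this.1, this.2]

theorem pv_pad_cons2 (a b : Char) (r : List Char) : pvPad (a :: b :: r) = a :: b :: pvPad r := by
  unfold pvPad
  have : (a :: b :: r).length % 2 = r.length % 2 := by simp only [List.length_cons]; omega
  rw [this]
  split <;> simp

theorem pv_pairsA_pad (cs : List Char) :
    pvPairsA cs = (pvPairsC (pvPad cs)).map (fun p => (pvValA p.1, pvValA p.2)) := by
  match cs with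
  | [] => rfl
  | [a] => rfl
  | a :: b :: r =>
    rw [pv_pad_cons2]
    show (pvValA a, pvValA b) :: pvPairsA r
        = (pvValA a, pvValA b) :: (pvPairsC (pvPad r)).map (fun p => (pvValA p.1, pvValA p.2))
    rw [pv_pairsA_pad r]

-- slices of A: line[idx:idx+1] and line[idx+1:idx+2] in drop/take form
theorem pv_sliceA (cs : List Char) (i : Nat) :
    PySem.List.slice cs (some (i : Int)) (some ((i : Int) + 1)) = (cs.drop i).take 1 := by
  have h : ((i : Int) + 1) = ((i + 1 : Nat) : Int) := by push_cast; ring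
  rw [h, PySem.List.slice_natCast]
  congr 1
  omega

theorem pv_goA (cs : List Char) (idx : Nat) :
    parse_disk_go cs idx = pvPairsA (cs.drop idx) := by
  rw [parse_disk_go]
  split
  · next h =>
    have hd : cs.drop idx = cs[idx] :: cs.drop (idx + 1) := List.drop_eq_getElem_cons h
    have hs1 : PySem.List.slice cs (some (idx : Int)) (some ((idx : Int) + 1)) = [cs[idx]] := by
      rw [pv_sliceA, hd]; rfl
    have hs2 : PySem.List.slice cs (some ((idx : Int) + 1)) (some ((idx : Int) + 2)) =
        (cs.drop (idx + 1)).take 1 := by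
      have h1 : ((idx : Int) + 1) = ((idx + 1 : Nat) : Int) := by push_cast; ring
      have h2 : ((idx : Int) + 2) = ((idx + 1 : Nat) : Int) + 1 := by push_cast; ring
      rw [h1, h2, pv_sliceA]
    have hrec := pv_goA cs (idx + 2)
    by_cases h2 : idx + 1 < cs.length
    · have hd2 : cs.drop (idx + 1) = cs[idx+1] :: cs.drop (idx + 2) := List.drop_eq_getElem_cons h2
      simp only [hs1, hs2, hd2, hrec, hd]
      show (_, ((PySem.Int.ofCharsBase? (if ([cs[idx+1]] : List Char) = [] then ['0'] else [cs[idx+1]]) 10).getD 0 : Int)) :: _ = _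
      simp only [reduceCtorEq]
      rfl
    · have hd2 : cs.drop (idx + 1) = [] := List.drop_eq_nil_of_le (by omega)
      have hd3 : cs.drop (idx + 2) = [] := List.drop_eq_nil_of_le (by omega)
      simp only [hs1, hs2, hd2, hd3, hrec, hd]
      rfl
  · next h =>
    have : cs.drop idx = [] := List.drop_eq_nil_of_le (by omega)
    rw [this]
    rfl
termination_by cs.length - idx
decreasing_by all_goals omega

-- B in terms of pvPairsC of the padded list
theorem pv_altB (line : String) :
    parse_disk_alt line
      = (pvPairsC (pvPad line.toList)).map (fun p => (pvValB p.1, pvValB p.2)) := by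
  unfold parse_disk_alt pvPad
  simp only [PySem.Chars.slice?, pv_slice_zero_two, pv_slice_one_two, Option.getD_some,
    pv_zip_evens_odds]
  rfl

-- ===== VERDICT (by name: the statement is the Claim_ definition above) =====
theorem parse_disk_spec : Claim_equal_parse_disk := by
  intro line _hdom hpre0
  have hpre : ∀ c ∈ line.toList, c.isDigit = true := by
    simpa [Pre_parse_disk, List.all_eq_true] using hpre0
  show parse_disk line = parse_disk_alt line
  rw [parse_disk, pv_goA, List.drop_zero, pv_pairsA_pad, pv_altB]
  apply List.map_congr_left
  intro p hp
  have hmem := pv_mem_pairsC _ p hp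
  have hdig : ∀ c ∈ pvPad line.toList, c.isDigit = true := by
    intro c hc
    unfold pvPad at hc
    split at hc
    · rcases List.mem_append.1 hc with h | h
      · exact hpre c h
      · simp at h; subst h; decide
    · exact hpre c hc
  have h1 := pv_digit_eq p.1 (hdig _ hmem.1)
  have h2 := pv_digit_eq p.2 (hdig _ hmem.2)
  simp only [pvValA, pvValB, h1, h2]
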